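-- pv_equiv track=rewrite | github.com/joonable/leet_code | programmers/더_맵게.py | solution
-- ===== SOURCE A (Python) =====
-- from heapq import heapify, heappush, heappop
--
-- def solution(scoville, K):
--     answer = 0
--     heapify(scoville)
--     while scoville[0] < K and len(scoville) > 1:
--         sco1 = heappop(scoville)
--         sco2 = heappop(scoville)
--         heappush(scoville, sco1 + sco2 * 2)
--         answer += 1
--     return answer if scoville[0] >= K else -1
-- ===== SOURCE B (Python) =====
-- def solution(scoville, K):
--     s = sorted(scoville)
--     answer = 0
--     while s[0] < K and len(s) > 1:
--         new = s[0] + s[1] * 2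
--         rest = s[2:]
--         s = [x for x in rest if x < new] + [new] + [x for x in rest if x >= new]
--         answer += 1
--     return answer if s[0] >= K else -1
-- ===== Notes on version B (the rewrite author's own statement) =====
-- stated objective: alternative
-- what changed: Replaces the binary heap with a sorted list: sort once, each round merge the two leading (smallest) elements and reinsert the merged value at its sorted position via a partition, instead of heapify/heappop/heappush; A heapifies the caller's list in place while B leaves it untouched (equivalence is on the return value).
import Mathlib
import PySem

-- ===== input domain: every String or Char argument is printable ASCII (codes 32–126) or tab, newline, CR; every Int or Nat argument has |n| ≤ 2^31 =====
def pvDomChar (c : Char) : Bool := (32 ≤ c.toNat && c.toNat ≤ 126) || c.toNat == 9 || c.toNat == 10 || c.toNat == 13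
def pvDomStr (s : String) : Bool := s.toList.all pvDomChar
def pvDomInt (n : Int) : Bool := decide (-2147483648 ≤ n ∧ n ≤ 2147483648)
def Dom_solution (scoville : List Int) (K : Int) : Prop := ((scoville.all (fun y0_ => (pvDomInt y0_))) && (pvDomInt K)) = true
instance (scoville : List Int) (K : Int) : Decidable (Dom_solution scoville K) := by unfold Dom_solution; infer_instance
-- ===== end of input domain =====

-- B replaces A's binary heap with a one-shot sort plus partition-reinsert; same return value.
-- A heapifies the caller's list in place; B does not mutate it — the equivalence proved here is about the return value only.

-- ===== PORT A =====
-- The heapq calls are library calls, ported by their contract: the heap's content is the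
-- multiset of elements, scoville[0] of a heap is its minimum, heappop removes (one copy of)
-- the minimum, heappush adds an element.  The while loop, with answer accumulator:
def solutionGo (h : List Int) (K ans : Int) : Int :=
  match hm : h.min? with
  | none => 0    -- unreachable under Pre_solution (empty heap: Python raises IndexError)
  | some m =>    -- m = scoville[0] of the heap
    if hc : m < K ∧ 1 < h.length then
      -- sco1 = heappop(scoville); sco2 = heappop(scoville)
      match hm2 : (h.erase m).min? with
      | none => 0    -- unreachable: len > 1 above
      | some m2 =>
        -- heappush(scoville, sco1 + sco2 * 2); answer += 1
        solutionGo ((m + m2 * 2) :: (h.erase m).erase m2) K (ans + 1)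
    else if m ≥ K then ans else -1
termination_by h.length
decreasing_by
  have h1m : m ∈ h := List.min?_mem hm
  have h2m : m2 ∈ h.erase m := List.min?_mem hm2
  have := List.length_erase_of_mem h1m
  have := List.length_erase_of_mem h2m
  simp only [List.length_cons]
  omega

def solution (scoville : List Int) (K : Int) : Int :=
  solutionGo scoville K 0

-- ===== PORT B =====
-- the while loop of Source B: s is kept sorted; each round merges s[0], s[1] and reinserts
def altGo (s : List Int) (K ans : Int) : Int :=
  match s with
  | [] => 0      -- unreachable under Pre_solution (s[0]: IndexError)
  | [a] =>       -- len(s) = 1: the while condition is false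
    if a ≥ K then ans else -1
  | a :: b :: rest =>
    if a < K then   -- len(s) > 1 holds
      let new := a + b * 2
      altGo (rest.filter (fun x => decide (x < new)) ++
             new :: rest.filter (fun x => !decide (x < new))) K (ans + 1)
    else if a ≥ K then ans else -1
termination_by s.length
decreasing_by
  have hc := List.length_eq_countP_add_countP (fun x => decide (x < a + b * 2)) (l := rest)
  simp only [decide_not, Bool.decide_eq_true] at hc
  rw [List.unattach_filter (g := fun x => decide (x < a + b * 2)) (hf := fun _ _ => rfl),
    List.unattach_filter (g := fun x => !decide (x < a + b * 2)) (hf := fun _ _ => rfl),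
    List.unattach_attach]
  simp only [List.length_cons, List.length_append, ← List.countP_eq_length_filter]
  omega

def solution_alt (scoville : List Int) (K : Int) : Int :=
  altGo (PySem.List.sorted scoville (fun x => x) false) K 0

-- ===== PRECONDITION & SPEC =====
-- Pre_ excludes only the empty list, on which A raises IndexError at scoville[0].
def Pre_solution (scoville : List Int) (K : Int) : Prop := scoville ≠ []
instance (scoville : List Int) (K : Int) : Decidable (Pre_solution scoville K) := by unfold Pre_solution; infer_instance
def pvWitness_solution : List Int × Int := ([1, 2, 3, 9, 10, 12], 7)

def Spec_solution (scoville : List Int) (K : Int) (out : Int) : Prop := out = solution_alt scoville K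
instance (scoville : List Int) (K : Int) (out : Int) : Decidable (Spec_solution scoville K out) := by unfold Spec_solution; infer_instance

-- ===== CLAIM (what is proved, stated in full; the proofs are below) =====
def Claim_equal_solution : Prop := ∀ (scoville : List Int) (K : Int), Dom_solution scoville K → Pre_solution scoville K → Spec_solution scoville K (solution scoville K)

-- ===== LEMMAS AND PROOFS =====

-- A sorted list's head is the list's minimum (as List.min?), through any permutation.
theorem min?_of_sorted_perm (a : Int) (t h : List Int)
    (hperm : (a :: t).Perm h) (hsort : (a :: t).Pairwise (· ≤ ·)) :
    h.min? = some a := by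
  rw [List.min?_eq_some_iff]
  constructor
  · exact hperm.subset (List.mem_cons_self)
  · intro x hx
    have hx' : x ∈ a :: t := hperm.mem_iff.mpr hx
    rcases List.mem_cons.mp hx' with rfl | hxt
    · exact le_rfl
    · exact (List.pairwise_cons.mp hsort).1 x hxt

-- partition-reinsert keeps the list sorted
theorem pairwise_partition_insert (rest : List Int) (v : Int)
    (hs : rest.Pairwise (· ≤ ·)) :
    (rest.filter (fun x => decide (x < v)) ++
      v :: rest.filter (fun x => !decide (x < v))).Pairwise (· ≤ ·) := by
  rw [List.pairwise_append]
  refine ⟨hs.sublist List.filter_sublist, ?_, ?_⟩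
  · rw [List.pairwise_cons]
    refine ⟨?_, hs.sublist List.filter_sublist⟩
    intro y hy
    have := (List.mem_filter.mp hy).2
    simp only [Bool.not_eq_eq_eq_not, Bool.not_true, decide_eq_false_iff_not, not_lt] at this
    exact this
  · intro x hx y hy
    have hxv : x < v := by simpa using (List.mem_filter.mp hx).2
    rcases List.mem_cons.mp hy with rfl | hy'
    · exact le_of_lt hxv
    · have hvy : v ≤ y := by
        have := (List.mem_filter.mp hy').2
        simp only [Bool.not_eq_eq_eq_not, Bool.not_true, decide_eq_false_iff_not, not_lt] at this
        exact this
      exact le_of_lt (lt_of_lt_of_le hxv hvy)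

-- the two loops agree whenever B's state is a sorted rearrangement of A's heap content
theorem go_eq (n : Nat) : ∀ (h s : List Int) (K ans : Int), h.length ≤ n →
    s.Perm h → s.Pairwise (· ≤ ·) → solutionGo h K ans = altGo s K ans := by
  induction n with
  | zero =>
    intro h s K ans hlen hperm _
    have hh : h = [] := List.length_eq_zero_iff.mp (Nat.le_zero.mp hlen)
    have hs : s = [] := List.length_eq_zero_iff.mp (by simpa [hh] using hperm.length_eq)
    subst hh; subst hs
    simp [solutionGo, altGo]
  | succ n ih =>
    intro h s K ans hlen hperm hsort
    match s with
    | [] =>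
      have hh : h = [] := List.length_eq_zero_iff.mp (by simpa using hperm.length_eq.symm)
      subst hh
      simp [solutionGo, altGo]
    | [a] =>
      have hh : h = [a] := (List.perm_singleton.mp hperm.symm)
      subst hh
      have hB : altGo [a] K ans = if a ≥ K then ans else -1 := by
        simp only [altGo]
      rw [solutionGo, hB]
      split
      · next hm => simp at hm
      · next m hm =>
        have hm' : m = a := Eq.symm (by simpa using hm)
        subst hm'
        rw [dif_neg (by simp)]
    | a :: b :: rest =>
      have hmin : h.min? = some a := min?_of_sorted_perm a (b :: rest) h hperm hsort
      have hlen2 : h.length = rest.length + 2 := by simpa using hperm.length_eq.symm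
      -- the erased heaps
      have hperm1 : (b :: rest).Perm (h.erase a) := by
        have := hperm.erase a
        simpa using this
      have hsort1 : (b :: rest).Pairwise (· ≤ ·) := (List.pairwise_cons.mp hsort).2
      have hmin2 : (h.erase a).min? = some b := min?_of_sorted_perm b rest _ hperm1 hsort1
      have hperm2 : rest.Perm ((h.erase a).erase b) := by
        have := hperm1.erase b
        simpa using this
      rw [solutionGo]
      split
      · next hm => rw [hmin] at hm; cases hm
      · next m hm =>
        rw [hmin] at hm
        injection hm with hm; subst hm
        by_cases haK : a < K
        · rw [dif_pos ⟨haK, by omega⟩]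
          split
          · next hm2 => rw [hmin2] at hm2; cases hm2
          · next m2 hm2 =>
            rw [hmin2] at hm2
            injection hm2 with hm2; subst hm2
            -- unfold one step of altGo
            have hB : altGo (a :: b :: rest) K ans =
                altGo (rest.filter (fun x => decide (x < a + b * 2)) ++
                  (a + b * 2) :: rest.filter (fun x => !decide (x < a + b * 2))) K (ans + 1) := by
              rw [altGo]
              simp [haK]
            rw [hB]
            apply ih
            · have ha : a ∈ h := hperm.subset (List.mem_cons_self)
              have hb : b ∈ h.erase a := hperm1.subset (List.mem_cons_self)
              have := List.length_erase_of_mem ha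
              have := List.length_erase_of_mem hb
              simp only [List.length_cons]
              omega
            · -- permutation: partitioned list ~ new :: rest ~ new :: erased heap
              refine List.Perm.trans (List.perm_middle) ?_
              refine List.Perm.cons _ ?_
              exact (List.filter_append_perm _ rest).trans hperm2
            · exact pairwise_partition_insert rest (a + b * 2)
                ((List.pairwise_cons.mp hsort1).2)
        · rw [dif_neg (by intro hc; exact haK hc.1)]
          have hB : altGo (a :: b :: rest) K ans = if a ≥ K then ans else -1 := by
            rw [altGo]
            simp [haK]
          rw [hB]

-- ===== VERDICT (by name: the statement is the Claim_ definition above) =====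
theorem solution_spec : Claim_equal_solution := by
  intro scoville K _ _
  unfold Spec_solution solution solution_alt
  exact (go_eq scoville.length scoville _ K 0 le_rfl
    (PySem.List.sorted_perm scoville (fun x => x) false)
    (PySem.List.sorted_pairwise scoville (fun x => x))).symm |>.symm
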